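-- pv_equiv track=rewrite | github.com/colinaardsma/gsa | projections/helpers/normalizer.py | team_comparer
-- ===== SOURCE A (Python) =====
-- def team_comparer(team_a, team_b):
--     team_list = {'LAA': ['LAA', 'AN', 'ANA'],
--                  'ARI': ['ARI'],
--                  'ATL': ['ATL'],
--                  'BAL': ['BAL'],
--                  'BOS': ['BOS'],
--                  'CHW': ['CHW', 'CHA', 'CWS'],
--                  'CHC': ['CHC', 'CHN'],
--                  'CIN': ['CIN'],
--                  'CLE': ['CLE'],
--                  'COL': ['COL'],
--                  'DET': ['DET'],
--                  'FA': ['FA'],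
--                  'MIA': ['MIA', 'FLO', 'FL'],
--                  'HOU': ['HOU'],
--                  'KC': ['KC', 'KCA'],
--                  'LAD': ['LAD', 'LAN', 'LA'],
--                  'MIL': ['MIL'],
--                  'MIN': ['MIN'],
--                  'NYY': ['NYY', 'NYA'],
--                  'NYM': ['NYM', 'NYN'],
--                  'OAK': ['OAK'],
--                  'PHI': ['PHI'],
--                  'PIT': ['PIT'],
--                  'SD': ['SD', 'SDN'],
--                  'SEA': ['SEA'],
--                  'SF': ['SF', 'SFN'],
--                  'STL': ['STL', 'SLN'],
--                  'TB': ['TB', 'TBA'],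
--                  'TEX': ['TEX'],
--                  'TOR': ['TOR'],
--                  'WAS': ['WAS', 'WSH']}
--     team_a = team_a.upper()
--     team_b = team_b.upper()
--     team_a_norm = "a"
--     team_b_norm = "b"
--     if team_a == team_b:
--         return True
--     for key, val in team_list.items():
--         if team_a in val:
--             team_a_norm = key
--         if team_b in val:
--             team_b_norm = key
--     if team_a_norm == team_b_norm:
--         return True
--     return False
-- ===== SOURCE B (Python) =====
-- GROUPS = [['LAA', 'AN', 'ANA'], ['ARI'], ['ATL'], ['BAL'], ['BOS'],
--           ['CHW', 'CHA', 'CWS'], ['CHC', 'CHN'], ['CIN'], ['CLE'], ['COL'],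
--           ['DET'], ['FA'], ['MIA', 'FLO', 'FL'], ['HOU'], ['KC', 'KCA'],
--           ['LAD', 'LAN', 'LA'], ['MIL'], ['MIN'], ['NYY', 'NYA'],
--           ['NYM', 'NYN'], ['OAK'], ['PHI'], ['PIT'], ['SD', 'SDN'], ['SEA'],
--           ['SF', 'SFN'], ['STL', 'SLN'], ['TB', 'TBA'], ['TEX'], ['TOR'],
--           ['WAS', 'WSH']]
--
-- # The "same team" relation stated extensionally: every ordered pair of aliases
-- # drawn from one group.  No canonical form is ever computed.
-- SAME = {(x, y) for g in GROUPS for x in g for y in g}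
--
--
-- def team_comparer(team_a, team_b):
--     a = team_a.upper()
--     b = team_b.upper()
--     return a == b or (a, b) in SAME
-- ===== Notes on version B (the rewrite author's own statement) =====
-- stated objective: alternative
-- what changed: B never computes a canonical abbreviation: it represents the same-team relation extensionally as a precomputed set of all ordered alias pairs drawn from one group, so the body is one equality test plus one pair-membership test instead of A's sentinel-normalizing scan over all 31 entries.
import Mathlib
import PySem

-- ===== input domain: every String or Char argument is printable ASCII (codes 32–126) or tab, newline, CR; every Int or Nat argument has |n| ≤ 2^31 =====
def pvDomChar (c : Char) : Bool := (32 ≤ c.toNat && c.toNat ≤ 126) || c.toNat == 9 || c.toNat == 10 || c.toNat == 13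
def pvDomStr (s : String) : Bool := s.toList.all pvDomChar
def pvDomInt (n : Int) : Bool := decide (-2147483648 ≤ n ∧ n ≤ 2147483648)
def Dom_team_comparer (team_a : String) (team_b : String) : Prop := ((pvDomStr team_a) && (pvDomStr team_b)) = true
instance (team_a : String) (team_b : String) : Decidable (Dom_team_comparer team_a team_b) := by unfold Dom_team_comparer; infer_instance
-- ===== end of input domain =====

-- B drops canonicalization entirely: the same-team relation is a precomputed set of
-- ordered alias pairs from one group, so the body is one pair-membership test (alternative).


-- ===== PORT A =====
-- the dict literal of A, hoisted as a named constant
def pvTeamList : PySem.Dict String (List String) := PySem.Dict.ofList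
  [("LAA", ["LAA", "AN", "ANA"]), ("ARI", ["ARI"]), ("ATL", ["ATL"]),
   ("BAL", ["BAL"]), ("BOS", ["BOS"]), ("CHW", ["CHW", "CHA", "CWS"]),
   ("CHC", ["CHC", "CHN"]), ("CIN", ["CIN"]), ("CLE", ["CLE"]),
   ("COL", ["COL"]), ("DET", ["DET"]), ("FA", ["FA"]),
   ("MIA", ["MIA", "FLO", "FL"]), ("HOU", ["HOU"]), ("KC", ["KC", "KCA"]),
   ("LAD", ["LAD", "LAN", "LA"]), ("MIL", ["MIL"]), ("MIN", ["MIN"]),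
   ("NYY", ["NYY", "NYA"]), ("NYM", ["NYM", "NYN"]), ("OAK", ["OAK"]),
   ("PHI", ["PHI"]), ("PIT", ["PIT"]), ("SD", ["SD", "SDN"]),
   ("SEA", ["SEA"]), ("SF", ["SF", "SFN"]), ("STL", ["STL", "SLN"]),
   ("TB", ["TB", "TBA"]), ("TEX", ["TEX"]), ("TOR", ["TOR"]),
   ("WAS", ["WAS", "WSH"])]

def team_comparer (team_a : String) (team_b : String) : Bool :=
  let team_a := PySem.Str.upper team_a
  let team_b := PySem.Str.upper team_b
  -- team_a_norm = "a"; team_b_norm = "b"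
  if team_a == team_b then true
  else
    -- for key, val in team_list.items(): two independent updates per entry
    let norms := pvTeamList.items.foldl
      (fun (st : String × String) kv =>
        (if kv.2.contains team_a then kv.1 else st.1,
         if kv.2.contains team_b then kv.1 else st.2)) ("a", "b")
    if norms.1 == norms.2 then true else false

-- ===== PORT B =====
-- GROUPS of Source B
def pvGroups : List (List String) :=
  [["LAA", "AN", "ANA"], ["ARI"], ["ATL"], ["BAL"], ["BOS"],
   ["CHW", "CHA", "CWS"], ["CHC", "CHN"], ["CIN"], ["CLE"], ["COL"],
   ["DET"], ["FA"], ["MIA", "FLO", "FL"], ["HOU"], ["KC", "KCA"],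
   ["LAD", "LAN", "LA"], ["MIL"], ["MIN"], ["NYY", "NYA"],
   ["NYM", "NYN"], ["OAK"], ["PHI"], ["PIT"], ["SD", "SDN"], ["SEA"],
   ["SF", "SFN"], ["STL", "SLN"], ["TB", "TBA"], ["TEX"], ["TOR"],
   ["WAS", "WSH"]]

-- SAME of Source B: the set comprehension {(x, y) for g in GROUPS for x in g for y in g}
def pvSame : PySem.Set (String × String) :=
  PySem.Set.ofList (pvGroups.flatMap (fun g => g.flatMap (fun x => g.map (fun y => (x, y)))))

def team_comparer_alt (team_a : String) (team_b : String) : Bool :=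
  let a := PySem.Str.upper team_a
  let b := PySem.Str.upper team_b
  a == b || PySem.Set.contains pvSame (a, b)

-- ===== PRECONDITION & SPEC =====
def Spec_team_comparer (team_a : String) (team_b : String) (out : Bool) : Prop := out = team_comparer_alt team_a team_b
instance (team_a : String) (team_b : String) (out : Bool) : Decidable (Spec_team_comparer team_a team_b out) := by unfold Spec_team_comparer; infer_instance

-- ===== CLAIM =====
def Claim_equal_team_comparer : Prop := ∀ (team_a : String) (team_b : String), Dom_team_comparer team_a team_b → Spec_team_comparer team_a team_b (team_comparer team_a team_b)

-- ===== LEMMAS AND PROOFS =====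

-- the one-sided version of A's loop
def pvF1 (x : String) (l : List (String × List String)) (init : String) : String :=
  l.foldl (fun s kv => if kv.2.contains x then kv.1 else s) init

-- every alias occurring anywhere
def pvAliases : List String := pvGroups.flatMap id

lemma pv_pair_fold (l : List (String × List String)) (x y a b : String) :
    l.foldl (fun (st : String × String) kv =>
      (if kv.2.contains x then kv.1 else st.1,
       if kv.2.contains y then kv.1 else st.2)) (a, b) = (pvF1 x l a, pvF1 y l b) := by
  induction l generalizing a b with
  | nil => rfl
  | cons kv l ih => simp [pvF1, List.foldl_cons] at *; exact ih _ _

lemma pvF1_of_absent (x : String) (l : List (String × List String)) (init : String)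
    (h : ∀ kv ∈ l, kv.2.contains x = false) : pvF1 x l init = init := by
  induction l generalizing init with
  | nil => rfl
  | cons kv l ih =>
    simp only [pvF1, List.foldl_cons] at *
    rw [h kv (by simp)]
    exact ih _ (fun p hp => h p (by simp [hp]))

lemma pvF1_of_hit (x : String) (l : List (String × List String))
    (h : ∃ kv ∈ l, kv.2.contains x = true) (init : String) :
    pvF1 x l init = pvF1 x l "" := by
  induction l generalizing init with
  | nil => simp at h
  | cons kv l ih =>
    simp only [pvF1, List.foldl_cons]
    by_cases hc : kv.2.contains x = true
    · simp only [hc, if_true]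
    · obtain ⟨p, hp, hpc⟩ := h
      rcases List.mem_cons.mp hp with rfl | hp'
      · exact absurd hpc hc
      · simp only [Bool.not_eq_true] at hc
        rw [hc]
        exact ih ⟨p, hp', hpc⟩ _

-- every alias mentioned in pvTeamList's lists is in pvAliases
set_option maxRecDepth 20000 in
lemma pv_table_aliases :
    pvTeamList.items.all (fun kv => kv.2.all (fun z => pvAliases.contains z)) = true := by decide

-- both components of every pair of pvSame are aliases
set_option maxRecDepth 20000 in
lemma pv_same_components :
    pvSame.all (fun p => pvAliases.contains p.1 && pvAliases.contains p.2) = true := by decide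

-- the sentinels are not aliases
lemma pv_sentinels : pvAliases.contains "a" = false ∧ pvAliases.contains "b" = false := by decide

-- for every known alias: A's scan hits it, and its result is itself an alias
set_option maxRecDepth 40000 in
lemma pv_alias_hit : pvAliases.all (fun x =>
    (pvTeamList.items.any (fun kv => kv.2.contains x)) &&
    pvAliases.contains (pvF1 x pvTeamList.items "")) = true := by decide

-- the finite heart: on alias pairs, A's canonical comparison = B's pair membership
set_option maxRecDepth 100000 in
set_option maxHeartbeats 1000000 in
lemma pv_alias_pairs : pvAliases.all (fun x => pvAliases.all (fun y =>
    ((pvF1 x pvTeamList.items "" == pvF1 y pvTeamList.items "")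
      == PySem.Set.contains pvSame (x, y)))) = true := by decide

lemma pv_mem_same_alias {x y : String} (h : PySem.Set.contains pvSame (x, y) = true) :
    pvAliases.contains x = true ∧ pvAliases.contains y = true := by
  have hm : (x, y) ∈ pvSame := by simpa [PySem.Set.contains] using h
  have := List.all_eq_true.mp pv_same_components _ hm
  exact ⟨(Bool.and_eq_true _ _).mp this |>.1, (Bool.and_eq_true _ _).mp this |>.2⟩

lemma pvF1_absent_of_not_alias {x : String} (hx : pvAliases.contains x = false) (init : String) :
    pvF1 x pvTeamList.items init = init := by
  apply pvF1_of_absent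
  intro kv hkv
  have h1 := List.all_eq_true.mp pv_table_aliases kv hkv
  by_contra hc
  have hmem : x ∈ kv.2 := by simpa using hc
  have h2 := List.all_eq_true.mp h1 x hmem
  rw [hx] at h2
  exact Bool.false_ne_true h2

-- the main pointwise lemma over arbitrary strings
lemma pv_core (x y : String) :
    (if x == y then true
     else if pvF1 x pvTeamList.items "a" == pvF1 y pvTeamList.items "b" then true else false)
    = (x == y || PySem.Set.contains pvSame (x, y)) := by
  by_cases hxy : x = y
  · simp [hxy]
  · have hne : (x == y) = false := by simp [hxy]
    rw [hne]
    simp only [Bool.false_or]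
    by_cases hx : pvAliases.contains x = true
    · by_cases hy : pvAliases.contains y = true
      · -- both aliases: use hit-normalization and the finite table
        have hxh := List.all_eq_true.mp pv_alias_hit x (by simpa using hx)
        have hyh := List.all_eq_true.mp pv_alias_hit y (by simpa using hy)
        rw [Bool.and_eq_true] at hxh hyh
        rw [pvF1_of_hit x _ (by simpa using List.any_eq_true.mp hxh.1) "a",
            pvF1_of_hit y _ (by simpa using List.any_eq_true.mp hyh.1) "b"]
        have hp := List.all_eq_true.mp
          (List.all_eq_true.mp pv_alias_pairs x (by simpa using hx)) y (by simpa using hy)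
        rw [beq_iff_eq] at hp
        rw [hp]
        split <;> simp_all
      · -- y not an alias: A compares canon/"a" against "b"; B's pair lacks a valid 2nd component
        have hy' : pvAliases.contains y = false := by simpa using hy
        rw [pvF1_absent_of_not_alias hy' "b"]
        have hA : (pvF1 x pvTeamList.items "a" == "b") = false := by
          have hxh := List.all_eq_true.mp pv_alias_hit x (by simpa using hx)
          rw [Bool.and_eq_true] at hxh
          rw [pvF1_of_hit x _ (by simpa using List.any_eq_true.mp hxh.1) "a"]
          by_contra h
          have hb : pvF1 x pvTeamList.items "" = "b" := by simpa using h
          rw [hb] at hxh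
          rw [pv_sentinels.2] at hxh
          exact Bool.false_ne_true hxh.2
        have hB : PySem.Set.contains pvSame (x, y) = false := by
          by_contra h
          have h2 := (pv_mem_same_alias (by simpa using h)).2
          rw [hy'] at h2
          exact Bool.false_ne_true h2
        rw [hA, hB]
        simp
    · -- x not an alias
      have hx' : pvAliases.contains x = false := by simpa using hx
      rw [pvF1_absent_of_not_alias hx' "a"]
      have hA : ("a" == pvF1 y pvTeamList.items "b") = false := by
        by_cases hy : pvAliases.contains y = true
        · have hyh := List.all_eq_true.mp pv_alias_hit y (by simpa using hy)
          rw [Bool.and_eq_true] at hyh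
          rw [pvF1_of_hit y _ (by simpa using List.any_eq_true.mp hyh.1) "b"]
          by_contra h
          have ha : "a" = pvF1 y pvTeamList.items "" := by simpa using h
          rw [← ha] at hyh
          rw [pv_sentinels.1] at hyh
          exact Bool.false_ne_true hyh.2
        · have hy' : pvAliases.contains y = false := by simpa using hy
          rw [pvF1_absent_of_not_alias hy' "b"]
          decide
      have hB : PySem.Set.contains pvSame (x, y) = false := by
        by_contra h
        have h2 := (pv_mem_same_alias (by simpa using h)).1
        rw [hx'] at h2
        exact Bool.false_ne_true h2
      rw [hA, hB]
      simp

-- ===== VERDICT =====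
theorem team_comparer_spec : Claim_equal_team_comparer := by
  intro team_a team_b _
  unfold Spec_team_comparer team_comparer team_comparer_alt
  simp only [pv_pair_fold]
  exact pv_core (PySem.Str.upper team_a) (PySem.Str.upper team_b)
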